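-- pv_equiv track=rewrite | github.com/laraherriott/SOM | som-prediction/train_no_pad.py | soms_match_fn
-- ===== SOURCE A (Python) =====
-- def soms_match_fn(G, P, L):
--     real = list()
--     #predictions = list()
--     max_atoms = list()
--     for k in range(len(G)):
--         new_G = []
--         for i in G[k]:
--             new_G.append(int(i))
--         per_mol = list()
--         count = 0
--         for i in L[k]:
--             per_mol.append(new_G[count:count+int(i)])
--             count += i
--
--         batch_real = list()
--         for mol in per_mol:
--             batch_real.append(mol.index(1)+1)
--
--         real.append(batch_real)
--
--         new_P = []
--         for i in P[k]:
--             new_P.append(int(i))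
--         per_mol_P = list()
--         count = 0
--         for i in L[k]:
--             per_mol_P.append(new_P[count:int(i)+count])
--             count += i
--
--         max_atom = list()
--         #batch_predictions = list()
--         for mol_P in per_mol_P:
--             max_atom.append(mol_P.index(max(mol_P))+1)
--             #batch_predictions.append(mol_P)
--         #predictions.append(batch_predictions)
--         max_atoms.append(max_atom)
--
--     return real, max_atoms
-- ===== SOURCE B (Python) =====
-- def soms_match_fn(G, P, L):
--     real = []
--     max_atoms = []
--     for gk, pk, lk in zip(G, P, L):
--         batch_real = []
--         batch_max = []
--         off = 0
--         for l in lk: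
--             one_pos = None
--             best_val = None
--             best_pos = 0
--             for j in range(l):
--                 if one_pos is None and gk[off + j] == 1:
--                     one_pos = j
--                 w = pk[off + j]
--                 if best_val is None or w > best_val:
--                     best_val = w
--                     best_pos = j
--             batch_real.append(one_pos + 1)
--             batch_max.append(best_pos + 1)
--             off += l
--         real.append(batch_real)
--         max_atoms.append(batch_max)
--     return real, max_atoms
-- ===== Notes on version B (the rewrite author's own statement) =====
-- stated objective: alternative
-- what changed: B replaces A's build-per-molecule-sublists-then-scan-each-twice (list slicing, then .index(1), then max() followed by .index(max)) with a running offset and one fused indexed pass per molecule that simultaneously records the first position equal to 1 and the running maximum with its first index, never materialising the sublists; …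
-- outside the precondition, e.g. on soms_match_fn([[0, 1, 0]], [[0, 1, 0]], [[-1]]): A returns ([[2]], [[2]]), B raises TypeError; on soms_match_fn([[1]], [[1]], [[5]]): A returns ([[1]], [[1]]), B raises IndexError
import Mathlib
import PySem

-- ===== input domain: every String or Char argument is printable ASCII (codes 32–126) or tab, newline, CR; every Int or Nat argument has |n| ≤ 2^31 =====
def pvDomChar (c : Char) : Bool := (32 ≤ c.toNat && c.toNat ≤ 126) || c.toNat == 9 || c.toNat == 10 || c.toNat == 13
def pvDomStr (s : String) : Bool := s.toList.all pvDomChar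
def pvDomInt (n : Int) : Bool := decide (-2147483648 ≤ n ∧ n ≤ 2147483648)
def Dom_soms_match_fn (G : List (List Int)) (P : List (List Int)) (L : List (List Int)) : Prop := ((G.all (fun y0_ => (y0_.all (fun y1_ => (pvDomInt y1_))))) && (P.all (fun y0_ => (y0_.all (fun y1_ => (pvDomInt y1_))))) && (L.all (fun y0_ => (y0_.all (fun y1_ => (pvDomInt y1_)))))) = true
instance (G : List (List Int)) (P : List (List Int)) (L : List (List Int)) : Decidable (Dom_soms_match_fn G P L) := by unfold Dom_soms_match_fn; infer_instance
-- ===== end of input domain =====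

-- B replaces A's build-sublists-then-scan-each-twice with a running offset and one fused
-- indexed pass per molecule (first position of 1, running maximum with its first index);
-- same cost class, no sublist allocation (objective: alternative decomposition).

-- ===== PORT A =====
def soms_match_fn (G : List (List Int)) (P : List (List Int)) (L : List (List Int)) : List (List Int) × List (List Int) :=
  (PySem.List.pyRange 0 (G.length : Int) 1).foldl (fun (st : List (List Int) × List (List Int)) k =>
    (st.1 ++ [
      -- new_G = [int(i) for i in G[k]]; per_mol = slices of new_G by L[k]; batch_real = [mol.index(1)+1]
      ((((PySem.List.pyGet? L k).getD []).foldl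
          (fun (st2 : List (List Int) × Int) i =>
            (st2.1 ++ [PySem.List.slice
              (((PySem.List.pyGet? G k).getD []).foldl (fun (acc : List Int) i => acc ++ [i]) [])
              (some st2.2) (some (st2.2 + i))], st2.2 + i)) ([], 0)).1).foldl
        (fun (acc : List Int) mol =>
          acc ++ [(((PySem.List.index? mol 1).getD 0 : Nat) : Int) + 1]) []],
     st.2 ++ [
      -- new_P, per_mol_P, max_atom = [mol_P.index(max(mol_P))+1]
      ((((PySem.List.pyGet? L k).getD []).foldl
          (fun (st2 : List (List Int) × Int) i =>
            (st2.1 ++ [PySem.List.slice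
              (((PySem.List.pyGet? P k).getD []).foldl (fun (acc : List Int) i => acc ++ [i]) [])
              (some st2.2) (some (i + st2.2))], st2.2 + i)) ([], 0)).1).foldl
        (fun (acc : List Int) mol =>
          acc ++ [(((PySem.List.index? mol
            ((PySem.List.max? mol (fun y => y)).getD 0)).getD 0 : Nat) : Int) + 1]) []]))
    ([], [])

-- ===== PORT B =====
-- the fused single pass over one molecule (Source B's `for j in range(l)` loop):
-- state = (one_pos : Option, best_val : Option, best_pos); `one_pos + 1` with one_pos = None
-- raises in Python (TypeError), so `.getD (-1)` below is only reached outside Pre_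
def pvScanMol (gk pk : List Int) (off l : Int) : Option Int × Option Int × Int :=
  (PySem.List.pyRange 0 l 1).foldl (fun (st : Option Int × Option Int × Int) j =>
    ((match st.1 with
      | none => if PySem.List.pyGetD gk (off + j) 0 = 1 then some j else none
      | some t => some t),
     (match st.2.1 with
      | none => some (PySem.List.pyGetD pk (off + j) 0)
      | some bv => if bv < PySem.List.pyGetD pk (off + j) 0
                   then some (PySem.List.pyGetD pk (off + j) 0) else some bv),
     (match st.2.1 with
      | none => j
      | some bv => if bv < PySem.List.pyGetD pk (off + j) 0 then j else st.2.2)))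
    (none, none, 0)

-- Source B's middle loop: fold over L[k] carrying (batch_real, batch_max, off)
def pvBatch (gk pk lk : List Int) : List Int × List Int :=
  ((lk.foldl (fun (st : List Int × List Int × Int) l =>
      (st.1 ++ [((pvScanMol gk pk st.2.2 l).1.getD (-1)) + 1],
       st.2.1 ++ [(pvScanMol gk pk st.2.2 l).2.2 + 1],
       st.2.2 + l)) ([], [], 0)).1,
   (lk.foldl (fun (st : List Int × List Int × Int) l =>
      (st.1 ++ [((pvScanMol gk pk st.2.2 l).1.getD (-1)) + 1],
       st.2.1 ++ [(pvScanMol gk pk st.2.2 l).2.2 + 1],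
       st.2.2 + l)) ([], [], 0)).2.1)

def soms_match_fn_alt (G : List (List Int)) (P : List (List Int)) (L : List (List Int)) : List (List Int) × List (List Int) :=
  (G.zip (P.zip L)).foldl (fun (st : List (List Int) × List (List Int)) t =>
    (st.1 ++ [(pvBatch t.1 t.2.1 t.2.2).1], st.2 ++ [(pvBatch t.1 t.2.1 t.2.2).2])) ([], [])

-- ===== PRECONDITION & SPEC =====
-- pvChunks xs ls = the per-molecule sublists xs[0:l0], xs[l0:l0+l1], …
def pvChunks : List Int → List Int → List (List Int)
  | _,  [] => []
  | xs, l :: ls => xs.take l.toNat :: pvChunks (xs.drop l.toNat) ls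

-- Pre_ excludes inputs where A raises (batch-length mismatch, a molecule with no 1 — which also
-- covers empty molecules — or negative molecule lengths), and the accidental cases where A still
-- returns a value through Python slicing's negative-bound wraparound or past-the-end truncation:
-- there B's direct indexed scan raises (TypeError resp. IndexError), so those inputs are excluded too.
def Pre_soms_match_fn (G : List (List Int)) (P : List (List Int)) (L : List (List Int)) : Prop :=
  G.length ≤ P.length ∧ G.length ≤ L.length ∧
  ∀ k, k < G.length →
    (∀ x ∈ L.getD k [], 0 ≤ x) ∧
    (L.getD k []).sum ≤ ((G.getD k []).length : Int) ∧
    (L.getD k []).sum ≤ ((P.getD k []).length : Int) ∧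
    (∀ m ∈ pvChunks (G.getD k []) (L.getD k []), (1 : Int) ∈ m)
instance (G : List (List Int)) (P : List (List Int)) (L : List (List Int)) : Decidable (Pre_soms_match_fn G P L) := by unfold Pre_soms_match_fn; infer_instance

def pvWitness_soms_match_fn : List (List Int) × List (List Int) × List (List Int) :=
  ([[0, 1]], [[3, 4]], [[2]])

def Spec_soms_match_fn (G : List (List Int)) (P : List (List Int)) (L : List (List Int)) (out : List (List Int) × List (List Int)) : Prop := out = soms_match_fn_alt G P L
instance (G : List (List Int)) (P : List (List Int)) (L : List (List Int)) (out : List (List Int) × List (List Int)) : Decidable (Spec_soms_match_fn G P L out) := by unfold Spec_soms_match_fn; infer_instance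

-- ===== CLAIM (what is proved, stated in full; the proofs are below) =====
def Claim_equal_soms_match_fn : Prop := ∀ (G : List (List Int)) (P : List (List Int)) (L : List (List Int)), Dom_soms_match_fn G P L → Pre_soms_match_fn G P L → Spec_soms_match_fn G P L (soms_match_fn G P L)

-- ===== LEMMAS AND PROOFS =====

-- spec-side helpers: what one molecule contributes on the A side
def pvFOne (m : List Int) : Int := (((PySem.List.index? m 1).getD 0 : Nat) : Int) + 1
def pvFMax (m : List Int) : Int :=
  (((PySem.List.index? m ((PySem.List.max? m (fun y => y)).getD 0)).getD 0 : Nat) : Int) + 1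

-- what B's fused scan produces on one molecule, phrased through index?/max?
def pvSpecOne (c : List Int) : Option Int := (PySem.List.index? c 1).map (fun n => (n : Int))
def pvSpecPos (c : List Int) : Int :=
  (((PySem.List.index? c ((PySem.List.max? c (fun y => y)).getD 0)).getD 0 : Nat) : Int)

lemma pv_index?_append_left {v : Int} (l l' : List Int) (h : v ∈ l) :
    PySem.List.index? (l ++ l') v = PySem.List.index? l v := by
  induction l with
  | nil => simp at h
  | cons x t ih =>
    rw [PySem.List.index?_eq_idxOf?, PySem.List.index?_eq_idxOf?]
    rw [List.cons_append, List.idxOf?_cons, List.idxOf?_cons]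
    by_cases hx : (x == v) = true
    · simp [hx]
    · have hv : v ∈ t := by
        rcases List.mem_cons.mp h with h' | h'
        · exact absurd (by simp [h']) hx
        · exact h'
      rw [if_neg hx, if_neg hx, ← PySem.List.index?_eq_idxOf?, ← PySem.List.index?_eq_idxOf?, ih hv]

lemma pv_index?_append_none (l : List Int) (v x : Int) (hv : v ∉ l) (hx : x ≠ v) :
    PySem.List.index? (l ++ [x]) v = none := by
  rw [PySem.List.index?_eq_none_iff]
  simp only [List.mem_append, List.mem_singleton]
  rintro (h | h)
  · exact hv h
  · exact hx h.symm

lemma pv_max?_append {l : List Int} {m : Int} (w : Int)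
    (h : PySem.List.max? l (fun y => y) = some m) :
    PySem.List.max? (l ++ [w]) (fun y => y) = some (max m w) := by
  have hne : l ≠ [] := by
    rintro rfl
    rw [show PySem.List.max? ([] : List Int) (fun y => y) = none from
      (PySem.List.max?_eq_none_iff _ _).mpr rfl] at h
    simp at h
  obtain ⟨x, t, rfl⟩ := List.exists_cons_of_ne_nil hne
  rw [PySem.List.max?_id_cons] at h
  rw [List.cons_append, PySem.List.max?_id_cons, List.foldl_append]
  simp [Option.some.inj h]

lemma pv_pair_fold {α β : Type} (l : List α) (h1 h2 : α → β) (a b : List β) :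
    l.foldl (fun (st : List β × List β) k => (st.1 ++ [h1 k], st.2 ++ [h2 k])) (a, b)
      = (a ++ l.map h1, b ++ l.map h2) := by
  induction l generalizing a b with
  | nil => simp
  | cons x t ih => simp [ih]

lemma pv_permol (ls : List Int) : ∀ (xs : List Int) (acc : List (List Int)) (c : Int), 0 ≤ c →
    (∀ x ∈ ls, 0 ≤ x) → c + ls.sum ≤ (xs.length : Int) →
    (ls.foldl (fun (st2 : List (List Int) × Int) i =>
        (st2.1 ++ [PySem.List.slice xs (some st2.2) (some (st2.2 + i))], st2.2 + i)) (acc, c)).1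
      = acc ++ pvChunks (xs.drop c.toNat) ls := by
  induction ls with
  | nil => intro xs acc c _ _ _; simp [pvChunks]
  | cons l t ih =>
    intro xs acc c hc hnn hsum
    have hl : 0 ≤ l := hnn l (by simp)
    have hts : 0 ≤ t.sum := List.sum_nonneg (fun x hx => hnn x (by simp [hx]))
    have hsums : (l :: t).sum = l + t.sum := by simp
    rw [hsums] at hsum
    have hb : c + l ≤ (xs.length : Int) := by omega
    rw [List.foldl_cons]
    have hslice : PySem.List.slice xs (some c) (some (c + l))
        = (xs.drop c.toNat).take l.toNat := by
      rw [PySem.List.slice_of_nonneg xs hc (by omega) (by omega) hb]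
      congr 1
      omega
    rw [hslice, ih xs (acc ++ [(xs.drop c.toNat).take l.toNat]) (c + l) (by omega)
      (fun x hx => hnn x (by simp [hx])) (by omega)]
    have hdd : xs.drop ((c + l).toNat) = (xs.drop c.toNat).drop l.toNat := by
      rw [List.drop_drop]
      congr 1
      omega
    rw [hdd]
    simp [pvChunks]

lemma pv_scan_spec (gk pk : List Int) (c : Nat) : ∀ (n : Nat),
    c + n ≤ gk.length → c + n ≤ pk.length →
    pvScanMol gk pk (c : Int) (n : Int)
      = (pvSpecOne ((gk.drop c).take n),
         PySem.List.max? ((pk.drop c).take n) (fun y => y),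
         pvSpecPos ((pk.drop c).take n)) := by
  intro n
  induction n with
  | zero =>
    intro _ _
    unfold pvScanMol
    rw [show ((0 : Nat) : Int) = 0 from rfl, PySem.List.pyRange_one_eq_nil le_rfl]
    have hmn : PySem.List.max? ([] : List Int) (fun y => y) = none :=
      (PySem.List.max?_eq_none_iff _ _).mpr rfl
    simp [pvSpecOne, pvSpecPos, hmn, PySem.List.index?_eq_idxOf?]
  | succ n ih =>
    intro hg hp
    have hg' : c + n ≤ gk.length := by omega
    have hp' : c + n ≤ pk.length := by omega
    have hcast : ((n + 1 : Nat) : Int) = (n : Int) + 1 := by push_cast; ring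
    unfold pvScanMol at ih ⊢
    rw [hcast, PySem.List.pyRange_one_succ_right (by positivity), List.foldl_append, ih hg' hp',
      List.foldl_cons, List.foldl_nil]
    have hcn : ((c : Int) + (n : Int)) = ((c + n : Nat) : Int) := by push_cast; ring
    have hgv : PySem.List.pyGetD gk ((c : Int) + (n : Int)) 0 = gk[c + n]'(by omega) := by
      rw [hcn, PySem.List.pyGetD_natCast, List.getD_eq_getElem gk 0 (by omega)]
    have hpv : PySem.List.pyGetD pk ((c : Int) + (n : Int)) 0 = pk[c + n]'(by omega) := by
      rw [hcn, PySem.List.pyGetD_natCast, List.getD_eq_getElem pk 0 (by omega)]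
    have hgtake : (gk.drop c).take (n + 1) = (gk.drop c).take n ++ [gk[c + n]'(by omega)] := by
      rw [List.take_add_one]
      congr 1
      rw [List.getElem?_drop, List.getElem?_eq_getElem (by omega : c + n < gk.length)]
      simp
    have hptake : (pk.drop c).take (n + 1) = (pk.drop c).take n ++ [pk[c + n]'(by omega)] := by
      rw [List.take_add_one]
      congr 1
      rw [List.getElem?_drop, List.getElem?_eq_getElem (by omega : c + n < pk.length)]
      simp
    have hglen : ((gk.drop c).take n).length = n := by
      simp
      omega
    have hplen : ((pk.drop c).take n).length = n := by
      simp
      omega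
    rw [hgtake, hptake, hgv, hpv]
    rcases h1 : PySem.List.index? ((gk.drop c).take n) 1 with _ | t1 <;>
      rcases h2 : PySem.List.max? ((pk.drop c).take n) (fun y => y) with _ | m0
    · -- no 1 yet, empty P prefix (n = 0)
      have hcp : (pk.drop c).take n = [] := (PySem.List.max?_eq_none_iff _ _).mp h2
      have hn0 : n = 0 := by rw [hcp] at hplen; simpa using hplen.symm
      subst hn0
      have hcg : (gk.drop c).take 0 = [] := by simp
      have hmn : (PySem.List.max? ([] : List Int) fun y => y) = none :=
        (PySem.List.max?_eq_none_iff _ _).mpr rfl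
      by_cases hv1 : gk[c]'(by omega) = (1 : Int)
      · simp [pvSpecOne, pvSpecPos, hcp, hcg, hv1, hmn, List.idxOf?_cons,
          PySem.List.max?_id_cons, PySem.List.index?_eq_idxOf?]
      · simp [pvSpecOne, pvSpecPos, hcp, hcg, hv1, hmn, List.idxOf?_cons,
          PySem.List.max?_id_cons, PySem.List.index?_eq_idxOf?]
    · -- no 1 yet, running max present
      have h1n : (1 : Int) ∉ (gk.drop c).take n := (PySem.List.index?_eq_none_iff _ _).mp h1
      have hm0mem : m0 ∈ (pk.drop c).take n := PySem.List.max?_mem h2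
      have h1' : List.idxOf? (1 : Int) ((gk.drop c).take n) = none := by
        simpa [PySem.List.index?_eq_idxOf?] using h1
      by_cases hv1 : gk[c + n]'(by omega) = (1 : Int)
      · have hidxg : List.idxOf? (1 : Int)
            ((gk.drop c).take n ++ [(1 : Int)]) = some n := by
          have := PySem.List.index?_append_singleton_self ((gk.drop c).take n) 1 h1n
          simpa [PySem.List.index?_eq_idxOf?, hglen] using this
        by_cases hlt : m0 < pk[c + n]'(by omega)
        · have hw : pk[c + n]'(by omega) ∉ (pk.drop c).take n := fun hmem =>
            absurd (PySem.List.max?_isMax h2 _ hmem) (by simpa using hlt)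
          have hidxp : List.idxOf? (pk[c + n]'(by omega))
              ((pk.drop c).take n ++ [pk[c + n]'(by omega)]) = some n := by
            have := PySem.List.index?_append_singleton_self ((pk.drop c).take n) _ hw
            simpa [PySem.List.index?_eq_idxOf?, hplen] using this
          simp [pvSpecOne, pvSpecPos, h1', h2, hidxg, hidxp, hlt, hv1, pv_max?_append _ h2,
            max_eq_right (le_of_lt hlt), PySem.List.index?_eq_idxOf?]
        · have hmax : max m0 (pk[c + n]'(by omega)) = m0 := max_eq_left (by omega)
          have hidxp : List.idxOf? m0 ((pk.drop c).take n ++ [pk[c + n]'(by omega)])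
              = List.idxOf? m0 ((pk.drop c).take n) := by
            have := pv_index?_append_left ((pk.drop c).take n) [pk[c + n]'(by omega)] hm0mem
            simpa [PySem.List.index?_eq_idxOf?] using this
          simp [pvSpecOne, pvSpecPos, h1', h2, hidxg, hidxp, hlt, hv1, pv_max?_append _ h2, hmax,
            PySem.List.index?_eq_idxOf?]
          try omega
      · have hidxg : List.idxOf? (1 : Int)
            ((gk.drop c).take n ++ [gk[c + n]'(by omega)]) = none := by
          have := pv_index?_append_none ((gk.drop c).take n) 1 _ h1n hv1
          simpa [PySem.List.index?_eq_idxOf?] using this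
        by_cases hlt : m0 < pk[c + n]'(by omega)
        · have hw : pk[c + n]'(by omega) ∉ (pk.drop c).take n := fun hmem =>
            absurd (PySem.List.max?_isMax h2 _ hmem) (by simpa using hlt)
          have hidxp : List.idxOf? (pk[c + n]'(by omega))
              ((pk.drop c).take n ++ [pk[c + n]'(by omega)]) = some n := by
            have := PySem.List.index?_append_singleton_self ((pk.drop c).take n) _ hw
            simpa [PySem.List.index?_eq_idxOf?, hplen] using this
          simp [pvSpecOne, pvSpecPos, h1', h2, hidxg, hidxp, hlt, hv1, pv_max?_append _ h2,
            max_eq_right (le_of_lt hlt), PySem.List.index?_eq_idxOf?]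
        · have hmax : max m0 (pk[c + n]'(by omega)) = m0 := max_eq_left (by omega)
          have hidxp : List.idxOf? m0 ((pk.drop c).take n ++ [pk[c + n]'(by omega)])
              = List.idxOf? m0 ((pk.drop c).take n) := by
            have := pv_index?_append_left ((pk.drop c).take n) [pk[c + n]'(by omega)] hm0mem
            simpa [PySem.List.index?_eq_idxOf?] using this
          simp [pvSpecOne, pvSpecPos, h1', h2, hidxg, hidxp, hlt, hv1, pv_max?_append _ h2, hmax,
            PySem.List.index?_eq_idxOf?]
          try omega
    · -- 1 found already, empty P prefix: impossible (n = 0 has no 1)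
      have hcp : (pk.drop c).take n = [] := (PySem.List.max?_eq_none_iff _ _).mp h2
      have hn0 : n = 0 := by rw [hcp] at hplen; simpa using hplen.symm
      subst hn0
      simp [PySem.List.index?_eq_idxOf?] at h1
    · -- 1 found already, running max present
      have h1mem : (1 : Int) ∈ (gk.drop c).take n :=
        (PySem.List.index?_isSome_iff ((gk.drop c).take n) 1).mp (by rw [h1]; rfl)
      have hm0mem : m0 ∈ (pk.drop c).take n := PySem.List.max?_mem h2
      have h1' : List.idxOf? (1 : Int) ((gk.drop c).take n) = some t1 := by
        simpa [PySem.List.index?_eq_idxOf?] using h1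
      have hidxg : List.idxOf? (1 : Int)
          ((gk.drop c).take n ++ [gk[c + n]'(by omega)]) = some t1 := by
        have := pv_index?_append_left ((gk.drop c).take n) [gk[c + n]'(by omega)] h1mem
        rw [h1] at this
        simpa [PySem.List.index?_eq_idxOf?] using this
      by_cases hlt : m0 < pk[c + n]'(by omega)
      · have hw : pk[c + n]'(by omega) ∉ (pk.drop c).take n := fun hmem =>
          absurd (PySem.List.max?_isMax h2 _ hmem) (by simpa using hlt)
        have hidxp : List.idxOf? (pk[c + n]'(by omega))
            ((pk.drop c).take n ++ [pk[c + n]'(by omega)]) = some n := by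
          have := PySem.List.index?_append_singleton_self ((pk.drop c).take n) _ hw
          simpa [PySem.List.index?_eq_idxOf?, hplen] using this
        simp [pvSpecOne, pvSpecPos, h1', h2, hidxg, hidxp, hlt, pv_max?_append _ h2,
          max_eq_right (le_of_lt hlt), PySem.List.index?_eq_idxOf?]
      · have hmax : max m0 (pk[c + n]'(by omega)) = m0 := max_eq_left (by omega)
        have hidxp : List.idxOf? m0 ((pk.drop c).take n ++ [pk[c + n]'(by omega)])
            = List.idxOf? m0 ((pk.drop c).take n) := by
          have := pv_index?_append_left ((pk.drop c).take n) [pk[c + n]'(by omega)] hm0mem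
          simpa [PySem.List.index?_eq_idxOf?] using this
        simp [pvSpecOne, pvSpecPos, h1', h2, hidxg, hidxp, hlt, pv_max?_append _ h2, hmax,
          PySem.List.index?_eq_idxOf?]
        try omega

-- per-batch equivalence: B's offset-carrying fold against the A-side per-molecule maps
lemma pv_batch_aux (ls : List Int) : ∀ (gk pk : List Int) (c : Nat) (a1 a2 : List Int),
    (∀ x ∈ ls, 0 ≤ x) → (c : Int) + ls.sum ≤ (gk.length : Int) →
    (c : Int) + ls.sum ≤ (pk.length : Int) →
    (∀ m ∈ pvChunks (gk.drop c) ls, (1 : Int) ∈ m) →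
    ls.foldl (fun (st : List Int × List Int × Int) l =>
        (st.1 ++ [((pvScanMol gk pk st.2.2 l).1.getD (-1)) + 1],
         st.2.1 ++ [(pvScanMol gk pk st.2.2 l).2.2 + 1],
         st.2.2 + l)) (a1, a2, (c : Int))
    = (a1 ++ (pvChunks (gk.drop c) ls).map pvFOne,
       a2 ++ (pvChunks (pk.drop c) ls).map pvFMax,
       (c : Int) + ls.sum) := by
  induction ls with
  | nil => intro gk pk c a1 a2 _ _ _ _; simp [pvChunks]
  | cons l t ih =>
    intro gk pk c a1 a2 hnn hg hp hmem
    have hl : 0 ≤ l := hnn l (by simp)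
    have hts : 0 ≤ t.sum := List.sum_nonneg (fun x hx => hnn x (by simp [hx]))
    have hsums : (l :: t).sum = l + t.sum := by simp
    rw [hsums] at hg hp
    have hln : l = ((l.toNat : Nat) : Int) := (Int.toNat_of_nonneg hl).symm
    have hgn : c + l.toNat ≤ gk.length := by omega
    have hpn : c + l.toNat ≤ pk.length := by omega
    have hchg : pvChunks (gk.drop c) (l :: t)
        = (gk.drop c).take l.toNat :: pvChunks (gk.drop (c + l.toNat)) t := by
      rw [pvChunks, List.drop_drop]
    have hchp : pvChunks (pk.drop c) (l :: t)
        = (pk.drop c).take l.toNat :: pvChunks (pk.drop (c + l.toNat)) t := by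
      rw [pvChunks, List.drop_drop]
    have hscan : pvScanMol gk pk (c : Int) l
        = (pvSpecOne ((gk.drop c).take l.toNat),
           PySem.List.max? ((pk.drop c).take l.toNat) (fun y => y),
           pvSpecPos ((pk.drop c).take l.toNat)) := by
      rw [hln]
      exact pv_scan_spec gk pk c l.toNat hgn hpn
    have h1g : (1 : Int) ∈ (gk.drop c).take l.toNat := by
      apply hmem
      rw [hchg]
      simp
    obtain ⟨k0, hk0⟩ := Option.isSome_iff_exists.mp
      ((PySem.List.index?_isSome_iff _ _).mpr h1g)
    rw [List.foldl_cons]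
    have hnext : (c : Int) + l = ((c + l.toNat : Nat) : Int) := by push_cast; omega
    have hstep : (a1 ++ [((pvScanMol gk pk (c : Int) l).1.getD (-1)) + 1],
         a2 ++ [(pvScanMol gk pk (c : Int) l).2.2 + 1], (c : Int) + l)
        = (a1 ++ [pvFOne ((gk.drop c).take l.toNat)],
           a2 ++ [pvFMax ((pk.drop c).take l.toNat)],
           ((c + l.toNat : Nat) : Int)) := by
      rw [hscan, ← hnext]
      simp only [pvSpecOne, pvSpecPos, pvFOne, pvFMax, hk0]
      simp
    rw [hstep, ih gk pk (c + l.toNat) _ _ (fun x hx => hnn x (by simp [hx]))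
      (by push_cast; omega) (by push_cast; omega)
      (fun m hm => hmem m (by rw [hchg]; exact List.mem_cons_of_mem _ hm))]
    rw [hchg, hchp]
    simp only [List.map_cons, List.append_assoc, List.singleton_append]
    simp only [Prod.mk.injEq]
    exact ⟨trivial, trivial, by push_cast; omega⟩

lemma pv_batch (gk pk lk : List Int) (hnn : ∀ x ∈ lk, 0 ≤ x)
    (hg : lk.sum ≤ (gk.length : Int)) (hp : lk.sum ≤ (pk.length : Int))
    (hmem : ∀ m ∈ pvChunks gk lk, (1 : Int) ∈ m) :
    pvBatch gk pk lk = ((pvChunks gk lk).map pvFOne, (pvChunks pk lk).map pvFMax) := by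
  unfold pvBatch
  have h := pv_batch_aux lk gk pk 0 [] [] hnn (by simpa using hg) (by simpa using hp)
    (by simpa using hmem)
  simp only [Nat.cast_zero] at h
  rw [h]
  simp

-- A's per-batch "real" pipeline equals the per-molecule map
lemma pv_Areal (gk lk : List Int) (hnn : ∀ x ∈ lk, 0 ≤ x) (hg : lk.sum ≤ (gk.length : Int)) :
    ((lk.foldl (fun (st2 : List (List Int) × Int) i =>
        (st2.1 ++ [PySem.List.slice (gk.foldl (fun (acc : List Int) i => acc ++ [i]) [])
          (some st2.2) (some (st2.2 + i))], st2.2 + i)) ([], 0)).1).foldl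
      (fun (acc : List Int) mol =>
        acc ++ [(((PySem.List.index? mol 1).getD 0 : Nat) : Int) + 1]) []
    = (pvChunks gk lk).map pvFOne := by
  simp only [PySem.List.foldl_append_singleton_eq_self, List.nil_append]
  rw [pv_permol lk gk [] 0 le_rfl hnn (by simpa using hg)]
  rw [show (fun (acc : List Int) mol =>
      acc ++ [(((PySem.List.index? mol 1).getD 0 : Nat) : Int) + 1])
    = (fun (acc : List Int) mol => acc ++ [pvFOne mol]) from rfl,
    PySem.List.foldl_append_singleton_eq_map]
  simp

-- A's per-batch "max atom" pipeline equals the per-molecule map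
lemma pv_Amax (pk lk : List Int) (hnn : ∀ x ∈ lk, 0 ≤ x) (hp : lk.sum ≤ (pk.length : Int)) :
    ((lk.foldl (fun (st2 : List (List Int) × Int) i =>
        (st2.1 ++ [PySem.List.slice (pk.foldl (fun (acc : List Int) i => acc ++ [i]) [])
          (some st2.2) (some (i + st2.2))], st2.2 + i)) ([], 0)).1).foldl
      (fun (acc : List Int) mol =>
        acc ++ [(((PySem.List.index? mol
          ((PySem.List.max? mol (fun y => y)).getD 0)).getD 0 : Nat) : Int) + 1]) []
    = (pvChunks pk lk).map pvFMax := by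
  simp only [PySem.List.foldl_append_singleton_eq_self, List.nil_append]
  have hcomm : (fun (st2 : List (List Int) × Int) (i : Int) =>
      (st2.1 ++ [PySem.List.slice pk (some st2.2) (some (i + st2.2))], st2.2 + i))
    = (fun (st2 : List (List Int) × Int) (i : Int) =>
      (st2.1 ++ [PySem.List.slice pk (some st2.2) (some (st2.2 + i))], st2.2 + i)) := by
    funext st2 i
    rw [Int.add_comm i st2.2]
  rw [hcomm, pv_permol lk pk [] 0 le_rfl hnn (by simpa using hp)]
  rw [show (fun (acc : List Int) mol =>
      acc ++ [(((PySem.List.index? mol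
        ((PySem.List.max? mol (fun y => y)).getD 0)).getD 0 : Nat) : Int) + 1])
    = (fun (acc : List Int) mol => acc ++ [pvFMax mol]) from rfl,
    PySem.List.foldl_append_singleton_eq_map]
  simp

theorem soms_match_fn_witness_pre :
    Pre_soms_match_fn pvWitness_soms_match_fn.1 pvWitness_soms_match_fn.2.1 pvWitness_soms_match_fn.2.2 := by
  decide

-- ===== VERDICT (by name: the statement is the Claim_ definition above) =====
set_option maxHeartbeats 2000000 in
theorem soms_match_fn_spec : Claim_equal_soms_match_fn := by
  intro G P L _hdom hpre
  obtain ⟨hP, hL, hk⟩ := hpre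
  unfold Spec_soms_match_fn soms_match_fn soms_match_fn_alt
  rw [pv_pair_fold, pv_pair_fold]
  simp only [List.nil_append]
  rw [PySem.List.pyRange_zero_natCast, List.map_map, Prod.ext_iff]
  refine ⟨?_, ?_⟩
  · apply List.ext_getElem
    · simp only [List.length_map, List.length_zip, List.length_range]
      omega
    · intro k hk1 hk2
      have hkG : k < G.length := by
        simpa only [List.length_map, List.length_range] using hk1
      have hkP : k < P.length := by omega
      have hkL : k < L.length := by omega
      obtain ⟨hnn, hg, hp, hmem⟩ := hk k hkG
      rw [List.getD_eq_getElem L [] hkL] at hnn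
      rw [List.getD_eq_getElem L [] hkL, List.getD_eq_getElem G [] hkG] at hg
      rw [List.getD_eq_getElem L [] hkL, List.getD_eq_getElem G [] hkG] at hmem
      have hGk : (PySem.List.pyGet? G ((k : Nat) : Int)).getD [] = G[k] := by
        simp [pysem, List.getElem?_eq_getElem hkG]
      have hLk : (PySem.List.pyGet? L ((k : Nat) : Int)).getD [] = L[k] := by
        simp [pysem, List.getElem?_eq_getElem hkL]
      simp only [Function.comp_apply, List.getElem_map, List.getElem_range, List.getElem_zip, hGk, hLk]
      rw [pv_batch G[k] P[k] L[k] hnn hg (by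
        rw [List.getD_eq_getElem L [] hkL, List.getD_eq_getElem P [] hkP] at hp
        exact hp) hmem]
      exact pv_Areal G[k] L[k] hnn hg
  · apply List.ext_getElem
    · simp only [List.length_map, List.length_zip, List.length_range]
      omega
    · intro k hk1 hk2
      have hkG : k < G.length := by
        simpa only [List.length_map, List.length_range] using hk1
      have hkP : k < P.length := by omega
      have hkL : k < L.length := by omega
      obtain ⟨hnn, hg, hp, hmem⟩ := hk k hkG
      rw [List.getD_eq_getElem L [] hkL] at hnn
      rw [List.getD_eq_getElem L [] hkL, List.getD_eq_getElem G [] hkG] at hg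
      rw [List.getD_eq_getElem L [] hkL, List.getD_eq_getElem P [] hkP] at hp
      rw [List.getD_eq_getElem L [] hkL, List.getD_eq_getElem G [] hkG] at hmem
      have hPk : (PySem.List.pyGet? P ((k : Nat) : Int)).getD [] = P[k] := by
        simp [pysem, List.getElem?_eq_getElem hkP]
      have hLk : (PySem.List.pyGet? L ((k : Nat) : Int)).getD [] = L[k] := by
        simp [pysem, List.getElem?_eq_getElem hkL]
      simp only [List.getElem_map, List.getElem_range, List.getElem_zip, hPk, hLk]
      rw [pv_batch G[k] P[k] L[k] hnn hg hp hmem]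
      exact pv_Amax P[k] L[k] hnn hp
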